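-- pv_equiv track=rewrite | github.com/ryder-mcdowell/Algorithms_WebApp | hw2.py | closestPairR
-- ===== SOURCE A (Python) =====
-- def closestPairR(list):
--     listLength = len(list)
--
--     if listLength == 2:
--         d = list[0] - list[1]
--         return (list[0], list[1], abs(d))
--
--     elif listLength == 3:
--         d = None
--         #iterate through list
--         for i in range(listLength - 1):
--             tmp = list[i] - list[i + 1]
--             #assign to values if first pair in list or closer than previously stored pair
--             if d == None or abs(d) > abs(tmp):
--                 d = tmp
--                 p1 = list[i]
--                 p2 = list[i + 1]
--         return (p1, p2, abs(d))
--
--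
--     else:
--         #find mid point
--         split = listLength // 2
--
--         #split and assign sides
--         left = list[:split]
--         right = list[split:]
--
--         #recursively call closestPair on both sides
--         (lp1, lp2, ld) = closestPairR(left)
--         (rp1, rp2, rd) = closestPairR(right)
--
--
--         #compare results
--         md = abs(left[len(left) - 1] - right[0])
--
--         if ld < rd:
--             p1 = lp1
--             p2 = lp2
--             d = ld
--         else:
--             p1 = rp1
--             p2 = rp2
--             d = rd
--
--         if md < d:
--             p1 = left[len(left) - 1]
--             p2 = right[0]
--             d = md
--
--         return (p1, p2, d)
-- ===== SOURCE B (Python) =====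
-- def closestPairR(list):
--     def go(lo, hi):
--         n = hi - lo
--         if n == 2:
--             return (list[lo], list[lo + 1], abs(list[lo] - list[lo + 1]))
--         if n == 3:
--             d1 = abs(list[lo] - list[lo + 1])
--             d2 = abs(list[lo + 1] - list[lo + 2])
--             if d2 < d1:
--                 return (list[lo + 1], list[lo + 2], d2)
--             return (list[lo], list[lo + 1], d1)
--         mid = lo + n // 2
--         (lp1, lp2, ld) = go(lo, mid)
--         (rp1, rp2, rd) = go(mid, hi)
--         md = abs(list[mid - 1] - list[mid])
--         if ld < rd:
--             (p1, p2, d) = (lp1, lp2, ld)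
--         else:
--             (p1, p2, d) = (rp1, rp2, rd)
--         if md < d:
--             (p1, p2, d) = (list[mid - 1], list[mid], md)
--         return (p1, p2, d)
--     return go(0, len(list))
-- ===== Notes on version B (the rewrite author's own statement) =====
-- stated objective: faster
-- what changed: Same divide-and-conquer recursion but over (lo,hi) index ranges with direct indexing instead of materialising list slices at every level, and the 3-element base case computed by two direct comparisons instead of a loop over an Optional accumulator.
import Mathlib
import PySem

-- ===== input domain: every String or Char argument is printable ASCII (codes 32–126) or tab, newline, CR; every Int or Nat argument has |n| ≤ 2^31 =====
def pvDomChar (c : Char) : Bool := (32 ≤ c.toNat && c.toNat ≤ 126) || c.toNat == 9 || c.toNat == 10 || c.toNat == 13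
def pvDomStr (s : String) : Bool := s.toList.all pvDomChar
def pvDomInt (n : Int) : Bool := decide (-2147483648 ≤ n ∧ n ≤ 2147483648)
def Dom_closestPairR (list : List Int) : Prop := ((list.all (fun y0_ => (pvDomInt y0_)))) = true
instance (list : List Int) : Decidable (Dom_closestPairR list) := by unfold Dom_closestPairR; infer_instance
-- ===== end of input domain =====

-- B replaces A's slice-allocating divide-and-conquer by the same recursion over (lo,hi) index
-- ranges (no slices; direct indexing), O(n) work instead of O(n log n); return value identical.

-- ===== PORT A =====
-- literal transliteration of A; the `length ≤ 1` guard only makes the function total: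
-- Python A recurses forever there (outside Pre_closestPairR)
def closestPairR (list : List Int) : Int × Int × Int :=
  if _h1 : list.length ≤ 1 then (0, 0, 0)
  else if _h2 : list.length = 2 then
    let d := PySem.List.pyGetD list 0 0 - PySem.List.pyGetD list 1 0
    (PySem.List.pyGetD list 0 0, PySem.List.pyGetD list 1 0, |d|)
  else if _h3 : list.length = 3 then
    -- for i in range(listLength - 1): accumulator (d : Option Int, p1, p2)
    let st := (PySem.List.pyRange 0 ((list.length : Int) - 1) 1).foldl
      (fun (st : Option Int × Int × Int) (i : Int) =>
        let tmp := PySem.List.pyGetD list i 0 - PySem.List.pyGetD list (i + 1) 0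
        match st.1 with
        | none => (some tmp, PySem.List.pyGetD list i 0, PySem.List.pyGetD list (i + 1) 0)
        | some d =>
          if |d| > |tmp| then (some tmp, PySem.List.pyGetD list i 0, PySem.List.pyGetD list (i + 1) 0)
          else st)
      (none, 0, 0)
    (st.2.1, st.2.2, |st.1.getD 0|)
  else
    let split := list.length / 2
    let left := PySem.List.slice list none (some (split : Int))
    let right := PySem.List.slice list (some (split : Int)) none
    let L := closestPairR left
    let R := closestPairR right
    let md := |PySem.List.pyGetD left ((left.length : Int) - 1) 0 - PySem.List.pyGetD right 0 0|
    let pd := if L.2.2 < R.2.2 then L else R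
    if md < pd.2.2 then
      (PySem.List.pyGetD left ((left.length : Int) - 1) 0, PySem.List.pyGetD right 0 0, md)
    else pd
termination_by list.length
decreasing_by
  · simp only [PySem.List.slice_to_natCast, List.length_take]; omega
  · simp only [PySem.List.slice_from_natCast, List.length_drop]; omega

-- ===== PORT B =====
-- literal transliteration of B's inner go(lo, hi); the `hi - lo < 2` guard only makes it total
def closestPairRGo (list : List Int) (lo hi : Nat) : Int × Int × Int :=
  let n := hi - lo
  if _h0 : n < 2 then (0, 0, 0)
  else if _h2 : n = 2 then
    (PySem.List.pyGetD list (lo : Int) 0, PySem.List.pyGetD list ((lo + 1 : Nat) : Int) 0,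
      |PySem.List.pyGetD list (lo : Int) 0 - PySem.List.pyGetD list ((lo + 1 : Nat) : Int) 0|)
  else if _h3 : n = 3 then
    let d1 := |PySem.List.pyGetD list (lo : Int) 0 - PySem.List.pyGetD list ((lo + 1 : Nat) : Int) 0|
    let d2 := |PySem.List.pyGetD list ((lo + 1 : Nat) : Int) 0 - PySem.List.pyGetD list ((lo + 2 : Nat) : Int) 0|
    if d2 < d1 then
      (PySem.List.pyGetD list ((lo + 1 : Nat) : Int) 0, PySem.List.pyGetD list ((lo + 2 : Nat) : Int) 0, d2)
    else
      (PySem.List.pyGetD list (lo : Int) 0, PySem.List.pyGetD list ((lo + 1 : Nat) : Int) 0, d1)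
  else
    let mid := lo + n / 2
    let L := closestPairRGo list lo mid
    let R := closestPairRGo list mid hi
    let md := |PySem.List.pyGetD list ((mid - 1 : Nat) : Int) 0 - PySem.List.pyGetD list (mid : Int) 0|
    let pd := if L.2.2 < R.2.2 then L else R
    if md < pd.2.2 then
      (PySem.List.pyGetD list ((mid - 1 : Nat) : Int) 0, PySem.List.pyGetD list (mid : Int) 0, md)
    else pd
termination_by hi - lo
decreasing_by
  · omega
  · omega

def closestPairR_alt (list : List Int) : Int × Int × Int :=
  closestPairRGo list 0 list.length

-- ===== PRECONDITION & SPEC =====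
-- Pre_ excludes lists of length < 2, on which Python A recurses forever (RecursionError)
def Pre_closestPairR (list : List Int) : Prop := 2 ≤ list.length
instance (list : List Int) : Decidable (Pre_closestPairR list) := by unfold Pre_closestPairR; infer_instance
def pvWitness_closestPairR : List Int := [1, 5, 2, 9]

def Spec_closestPairR (list : List Int) (out : Int × Int × Int) : Prop := out = closestPairR_alt list
instance (list : List Int) (out : Int × Int × Int) : Decidable (Spec_closestPairR list out) := by unfold Spec_closestPairR; infer_instance

-- ===== CLAIM (what is proved, stated in full; the proofs are below) =====
def Claim_equal_closestPairR : Prop := ∀ (list : List Int), Dom_closestPairR list → Pre_closestPairR list → Spec_closestPairR list (closestPairR list)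

-- ===== LEMMAS AND PROOFS =====

-- indexing into the (lo,hi) sub-list of `list` is indexing into `list` at lo + i
lemma sub_getD (list : List Int) (lo m i : Nat) (him : i < m) :
    ((list.drop lo).take m).getD i 0 = list.getD (lo + i) 0 := by
  simp [List.getD_eq_getElem?_getD, him, List.getElem?_drop]

-- main invariant: the index-range recursion computes A on the corresponding sub-list
lemma goAlt_eq (list : List Int) (lo hi : Nat) (hhi : hi ≤ list.length) (hlo : lo ≤ hi) :
    closestPairRGo list lo hi = closestPairR ((list.drop lo).take (hi - lo)) := by
  have H : ∀ m lo hi, hi - lo = m → hi ≤ list.length → lo ≤ hi →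
      closestPairRGo list lo hi = closestPairR ((list.drop lo).take (hi - lo)) := by
    intro m
    induction m using Nat.strong_induction_on with
    | _ m IH =>
      intro lo hi hm hhi hlo
      have hlen : ((list.drop lo).take (hi - lo)).length = hi - lo := by
        simp [List.length_take, List.length_drop]; omega
      rw [closestPairRGo, closestPairR]
      by_cases h0 : hi - lo < 2
      · simp [h0, hlen]; omega
      · have e0 : PySem.List.pyGetD ((list.drop lo).take (hi - lo)) 0 0 = list.getD (lo + 0) 0 := by
          rw [PySem.List.pyGetD_zero, sub_getD]; omega
        have e1 : PySem.List.pyGetD ((list.drop lo).take (hi - lo)) 1 0 = list.getD (lo + 1) 0 := by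
          rw [show (1:Int) = ((1:Nat):Int) from rfl, PySem.List.pyGetD_natCast, sub_getD]; omega
        have c1 : ¬ (((list.drop lo).take (hi - lo)).length ≤ 1) := by rw [hlen]; omega
        by_cases h2 : hi - lo = 2
        · have c2 : ((list.drop lo).take (hi - lo)).length = 2 := by rw [hlen]; exact h2
          simp only [dif_neg h0, dif_pos h2, dif_neg c1, dif_pos c2, e0, e1,
            PySem.List.pyGetD_natCast, List.getD_eq_getElem?_getD]
          norm_num
        · have c2 : ¬ (((list.drop lo).take (hi - lo)).length = 2) := by rw [hlen]; exact h2
          by_cases h3 : hi - lo = 3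
          · have c3 : ((list.drop lo).take (hi - lo)).length = 3 := by rw [hlen]; exact h3
            have e2 : PySem.List.pyGetD ((list.drop lo).take (hi - lo)) 2 0 = list.getD (lo + 2) 0 := by
              rw [show (2:Int) = ((2:Nat):Int) from rfl, PySem.List.pyGetD_natCast, sub_getD]; omega
            simp only [dif_neg h0, dif_neg h2, dif_pos h3, dif_neg c1, dif_neg c2, dif_pos c3]
            rw [c3, show (((3:Nat):Int) - 1) = 2 from by norm_num,
              show PySem.List.pyRange 0 2 1 = [0, 1] from by decide]
            simp only [List.foldl, PySem.List.pyGetD_natCast]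
            norm_num [e0, e1, e2]
            split_ifs <;> simp_all
          · -- n ≥ 4: the recursive branch on both sides
            have c3 : ¬ (((list.drop lo).take (hi - lo)).length = 3) := by rw [hlen]; exact h3
            simp only [dif_neg h0, dif_neg h2, dif_neg h3, hlen]
            set k := (hi - lo) / 2 with hk
            have hk2 : 2 ≤ k := by omega
            have hkn : k + 2 ≤ hi - lo := by omega
            have hL : PySem.List.slice ((list.drop lo).take (hi - lo)) none (some ((k : Nat) : Int))
                = (list.drop lo).take k := by
              rw [PySem.List.slice_to_natCast, List.take_take]; congr 1; omega
            have hR : PySem.List.slice ((list.drop lo).take (hi - lo)) (some ((k : Nat) : Int)) none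
                = (list.drop (lo + k)).take (hi - lo - k) := by
              rw [PySem.List.slice_from_natCast, List.drop_take, List.drop_drop]
            have hlenL : ((list.drop lo).take k).length = k := by
              simp [List.length_take, List.length_drop]; omega
            have hIHL := IH k (by omega) lo (lo + k) (by omega) (by omega) (by omega)
            rw [show lo + k - lo = k from by omega] at hIHL
            have hIHR := IH (hi - lo - k) (by omega) (lo + k) hi (by omega) hhi (by omega)
            rw [show hi - (lo + k) = hi - lo - k from by omega] at hIHR
            have eML : PySem.List.pyGetD ((list.drop lo).take k) ((((list.drop lo).take k).length : Int) - 1) 0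
                = list.getD (lo + k - 1) 0 := by
              rw [hlenL, show ((k : Int) - 1) = ((k - 1 : Nat) : Int) from by omega,
                PySem.List.pyGetD_natCast, sub_getD, show lo + (k - 1) = lo + k - 1 from by omega]
              omega
            have eMR : PySem.List.pyGetD ((list.drop (lo + k)).take (hi - lo - k)) 0 0
                = list.getD (lo + k) 0 := by
              rw [PySem.List.pyGetD_zero, sub_getD, Nat.add_zero]; omega
            simp only [hL, hR, ← hIHL, ← hIHR, eML, eMR, PySem.List.pyGetD_natCast]
            rw [show lo + k - 1 = lo + (hi - lo) / 2 - 1 from by omega,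
              dif_neg (show ¬ (hi - lo ≤ 1) from by omega)]
  exact H (hi - lo) lo hi rfl hhi hlo

-- ===== VERDICT (by name: the statement is the Claim_ definition above) =====
theorem closestPairR_spec : Claim_equal_closestPairR := by
  intro list _hdom _hpre
  show closestPairR list = closestPairR_alt list
  rw [closestPairR_alt, goAlt_eq list 0 list.length (le_refl _) (Nat.zero_le _)]
  simp
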